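-- pv_equiv track=rewrite | github.com/grantemj/AdventOfCode | 2020/Prob_10.py | FindPossibleDifs
-- ===== SOURCE A (Python) =====
-- def FindPossibleDifs(order):
--     if(len(order) < 3): # Not enough
--         return 0
--     total = 0
--     for idx in range(len(order)-2):
--         if(order[idx+2] - order[idx] < 4):
--             # Can get rid of idx+1
--             total += 1 + FindPossibleDifs(order[:idx+1]+order[idx+2:])
--     return total
-- ===== SOURCE B (Python) =====
-- def FindPossibleDifs(order):
--     # Explicit-stack traversal: count one per valid removal pushed, instead of 1 + recurse.
--     stack = [order]
--     count = 0
--     while stack: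
--         cur = stack.pop()
--         for idx in range(len(cur) - 2):
--             if cur[idx + 2] - cur[idx] < 4:
--                 count += 1
--                 stack.append(cur[:idx + 1] + cur[idx + 2:])
--     return count
-- ===== Notes on version B (the rewrite author's own statement) =====
-- stated objective: alternative
-- what changed: Replaces A's recursive '1 + FindPossibleDifs(shortened)' summation by an explicit LIFO stack of sublists and a single counter incremented once per valid removal pushed (an iterative edge-count over the same traversal tree).
import Mathlib
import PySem

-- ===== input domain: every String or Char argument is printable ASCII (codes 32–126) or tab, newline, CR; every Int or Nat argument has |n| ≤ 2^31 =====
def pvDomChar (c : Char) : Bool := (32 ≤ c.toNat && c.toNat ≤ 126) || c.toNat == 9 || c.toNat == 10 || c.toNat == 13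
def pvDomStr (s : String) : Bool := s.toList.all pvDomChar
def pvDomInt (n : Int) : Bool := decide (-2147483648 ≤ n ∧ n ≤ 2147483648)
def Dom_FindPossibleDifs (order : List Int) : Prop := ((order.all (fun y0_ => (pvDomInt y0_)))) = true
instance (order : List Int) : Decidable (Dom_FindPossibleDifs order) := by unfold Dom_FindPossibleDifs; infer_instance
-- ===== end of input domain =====

-- B replaces A's "1 + recurse" summation by an explicit stack of sublists with a single
-- counter incremented once per valid removal pushed (alternative decomposition, same cost).


-- ===== PORT A =====
-- termination lemma cited by FindPossibleDifs's decreasing_by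
lemma pvA_dec (order : List Int) (idx : Int)
    (hmem : idx ∈ PySem.List.pyRange 0 ((order.length : Int) - 2) 1) :
    (PySem.List.slice order none (some (idx + 1)) ++
      PySem.List.slice order (some (idx + 2)) none).length < order.length := by
  have hb := PySem.List.mem_pyRange_one.mp hmem
  rw [PySem.List.slice_to order (by omega), PySem.List.slice_from order (by omega)]
  simp only [List.length_append, List.length_take, List.length_drop]
  omega

-- A: if len < 3 return 0; else accumulate, over idx in range(len-2),
-- 1 + recurse on order[:idx+1]+order[idx+2:] whenever order[idx+2]-order[idx] < 4.
def FindPossibleDifs (order : List Int) : Int :=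
  if order.length < 3 then 0
  else
    ((PySem.List.pyRange 0 ((order.length : Int) - 2) 1).attach.map
      (fun idx =>
        if PySem.List.pyGetD order (idx.1 + 2) 0 - PySem.List.pyGetD order idx.1 0 < 4 then
          1 + FindPossibleDifs
                (PySem.List.slice order none (some (idx.1 + 1)) ++
                 PySem.List.slice order (some (idx.1 + 2)) none)
        else 0)).sum
termination_by order.length
decreasing_by exact pvA_dec order idx.1 idx.2

-- ===== PORT B =====
-- helper measure, and the bound lemmas cited by pvAltLoop's decreasing_by
def pvM (stack : List (List Int)) : Nat := (stack.map (fun l => l.length.factorial)).sum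

-- inner 'for idx in range(len(cur)-2)' loop of B: pushes each valid shortened list, counts one each
def pvAltScan (cur : List Int) (idxs : List Int) (stack : List (List Int)) (count : Int) :
    List (List Int) × Int :=
  match idxs with
  | [] => (stack, count)
  | idx :: rest =>
    if PySem.List.pyGetD cur (idx + 2) 0 - PySem.List.pyGetD cur idx 0 < 4 then
      pvAltScan cur rest
        ((PySem.List.slice cur none (some (idx + 1)) ++
          PySem.List.slice cur (some (idx + 2)) none) :: stack) (count + 1)
    else pvAltScan cur rest stack count

lemma pvAltScan_measure (cur : List Int) (idxs : List Int) (stack : List (List Int)) (count : Int)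
    (h : ∀ i ∈ idxs, 0 ≤ i ∧ i < (cur.length : Int) - 2) :
    pvM (pvAltScan cur idxs stack count).1 ≤
      pvM stack + idxs.length * (cur.length - 1).factorial := by
  induction idxs generalizing stack count with
  | nil => simp [pvAltScan]
  | cons idx rest ih =>
    have hb := h idx (by simp)
    have hlen : (PySem.List.slice cur none (some (idx + 1)) ++
        PySem.List.slice cur (some (idx + 2)) none).length = cur.length - 1 := by
      rw [PySem.List.slice_to cur (by omega), PySem.List.slice_from cur (by omega)]
      simp only [List.length_append, List.length_take, List.length_drop]
      omega
    simp only [pvAltScan]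
    split
    · have := ih ((PySem.List.slice cur none (some (idx + 1)) ++
          PySem.List.slice cur (some (idx + 2)) none) :: stack) (count + 1)
        (fun i hi => h i (by simp [hi]))
      simp only [pvM, List.map_cons, List.sum_cons, hlen, List.length_cons, Nat.succ_mul]
        at this ⊢
      omega
    · have := ih stack count (fun i hi => h i (by simp [hi]))
      simp only [List.length_cons, Nat.succ_mul]
      omega

lemma pvM_decrease (cur : List Int) (rest : List (List Int)) (count : Int) :
    pvM (pvAltScan cur (PySem.List.pyRange 0 ((cur.length : Int) - 2) 1) rest count).1 <
      pvM (cur :: rest) := by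
  have h := pvAltScan_measure cur (PySem.List.pyRange 0 ((cur.length : Int) - 2) 1) rest count
    (fun i hi => by have := PySem.List.mem_pyRange_one.mp hi; omega)
  rw [PySem.List.length_pyRange_one] at h
  have hfac : (((cur.length : Int) - 2 - 0).toNat) * (cur.length - 1).factorial <
      cur.length.factorial := by
    rcases Nat.lt_or_ge cur.length 3 with h3 | h3
    · have h0 : (((cur.length : Int) - 2 - 0).toNat) = 0 := by omega
      rw [h0]; simpa using Nat.factorial_pos cur.length
    · have hk : (((cur.length : Int) - 2 - 0).toNat) = cur.length - 2 := by omega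
      have hsplit : cur.length.factorial = cur.length * (cur.length - 1).factorial := by
        conv_lhs => rw [show cur.length = (cur.length - 1) + 1 by omega]
        rw [Nat.factorial_succ]
        congr 2; omega
      rw [hk, hsplit]
      exact Nat.mul_lt_mul_of_lt_of_le (by omega) (le_refl _) (Nat.factorial_pos _)
  have hm : pvM (cur :: rest) = cur.length.factorial + pvM rest := by simp [pvM]
  omega

-- outer 'while stack' loop of B (stack top at the head; pop = head, append = cons)
def pvAltLoop (stack : List (List Int)) (count : Int) : Int :=
  match stack with
  | [] => count
  | cur :: rest =>
    let p := pvAltScan cur (PySem.List.pyRange 0 ((cur.length : Int) - 2) 1) rest count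
    pvAltLoop p.1 p.2
termination_by pvM stack
decreasing_by exact pvM_decrease cur rest count

def FindPossibleDifs_alt (order : List Int) : Int := pvAltLoop [order] 0

-- ===== PRECONDITION & SPEC =====
def Spec_FindPossibleDifs (order : List Int) (out : Int) : Prop := out = FindPossibleDifs_alt order
instance (order : List Int) (out : Int) : Decidable (Spec_FindPossibleDifs order out) := by unfold Spec_FindPossibleDifs; infer_instance

-- ===== CLAIM (what is proved, stated in full; the proofs are below) =====
def Claim_equal_FindPossibleDifs : Prop := ∀ (order : List Int), Dom_FindPossibleDifs order → Spec_FindPossibleDifs order (FindPossibleDifs order)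

-- ===== LEMMAS AND PROOFS =====

-- the shortened list both programs build, and the valid-removal test (proof-side names)
def pvChild (cur : List Int) (idx : Int) : List Int :=
  PySem.List.slice cur none (some (idx + 1)) ++ PySem.List.slice cur (some (idx + 2)) none

def pvCond (cur : List Int) (idx : Int) : Bool :=
  decide (PySem.List.pyGetD cur (idx + 2) 0 - PySem.List.pyGetD cur idx 0 < 4)

-- children pushed by B's inner loop when scanning idxs, top-of-stack first
def pvChildren (cur : List Int) (idxs : List Int) : List (List Int) :=
  ((idxs.filter (pvCond cur)).map (pvChild cur)).reverse

lemma pvAltScan_eq (cur : List Int) (idxs : List Int) (stack : List (List Int)) (count : Int) :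
    pvAltScan cur idxs stack count =
      (pvChildren cur idxs ++ stack, count + (pvChildren cur idxs).length) := by
  induction idxs generalizing stack count with
  | nil => simp [pvAltScan, pvChildren]
  | cons idx rest ih =>
    simp only [pvAltScan]
    by_cases hc : pvCond cur idx = true
    · rw [if_pos (by simpa [pvCond] using hc), ih]
      simp [pvChildren, hc, pvChild]
      omega
    · rw [if_neg (by simpa [pvCond] using hc), ih]
      simp [pvChildren, hc]

lemma pvSum_split (cur : List Int) (idxs : List Int) :
    ((idxs.map (fun i => if pvCond cur i then 1 + FindPossibleDifs (pvChild cur i) else 0)).sum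
        : Int) =
      ((idxs.filter (pvCond cur)).length : Int) +
      ((idxs.filter (pvCond cur)).map
        (fun i => FindPossibleDifs (pvChild cur i))).sum := by
  induction idxs with
  | nil => simp
  | cons idx rest ih =>
    by_cases hc : pvCond cur idx = true
    · simp [hc, ih]
      ring
    · simp [hc, ih]

lemma pvF_eq_children (cur : List Int) :
    FindPossibleDifs cur =
      ((pvChildren cur (PySem.List.pyRange 0 ((cur.length : Int) - 2) 1)).length : Int) +
      ((pvChildren cur (PySem.List.pyRange 0 ((cur.length : Int) - 2) 1)).map
        FindPossibleDifs).sum := by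
  by_cases h : cur.length < 3
  · have hr : PySem.List.pyRange 0 ((cur.length : Int) - 2) 1 = [] :=
      PySem.List.pyRange_one_eq_nil (by omega)
    rw [FindPossibleDifs, if_pos h, hr]
    simp [pvChildren]
  · rw [FindPossibleDifs, if_neg h]
    have e1 : (fun idx : {x // x ∈ PySem.List.pyRange 0 ((cur.length : Int) - 2) 1} =>
        if PySem.List.pyGetD cur (idx.1 + 2) 0 - PySem.List.pyGetD cur idx.1 0 < 4 then
          1 + FindPossibleDifs (PySem.List.slice cur none (some (idx.1 + 1)) ++
            PySem.List.slice cur (some (idx.1 + 2)) none)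
        else 0)
        = (fun idx => if pvCond cur idx.1 then 1 + FindPossibleDifs (pvChild cur idx.1)
            else 0) := by
      funext x
      simp [pvCond, pvChild]
    rw [e1]
    have hattach : ((PySem.List.pyRange 0 ((cur.length : Int) - 2) 1).attach.map
          (fun idx => if pvCond cur idx.1 then 1 + FindPossibleDifs (pvChild cur idx.1)
            else 0)).sum
        = ((PySem.List.pyRange 0 ((cur.length : Int) - 2) 1).map
          (fun i => if pvCond cur i then 1 + FindPossibleDifs (pvChild cur i) else 0)).sum := by
      simp
    rw [hattach, pvSum_split]
    simp only [pvChildren, List.map_reverse, List.sum_reverse, List.length_reverse,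
      List.length_map, List.map_map, Function.comp_def]

lemma pvAltLoop_eq (stack : List (List Int)) (count : Int) :
    pvAltLoop stack count = count + (stack.map FindPossibleDifs).sum := by
  induction stack, count using pvAltLoop.induct with
  | case1 count => simp [pvAltLoop]
  | case2 count cur rest p ih =>
    rw [pvAltLoop]
    simp only [p] at ih
    rw [pvAltScan_eq] at ih ⊢
    simp only [ih]
    simp only [List.map_cons, List.sum_cons, List.map_append, List.sum_append]
    rw [pvF_eq_children cur]
    ring

-- ===== VERDICT (by name: the statement is the Claim_ definition above) =====
theorem FindPossibleDifs_spec : Claim_equal_FindPossibleDifs := by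
  intro order _
  show _ = _
  rw [FindPossibleDifs_alt, pvAltLoop_eq]
  simp
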